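-- pv_equiv track=rewrite | github.com/leeyoungseok/slack-bot | meal_form.py | make_menu_ilpum
-- ===== SOURCE A (Python) =====
-- def make_menu_ilpum(data):
--     i=0;
--     iscontinue=False
--     str='\t'
--     for key in data.split():
--         if key=='(pork' or key=='(beef' or key=='(pork,' or key=='beef' or key=='null':
--             continue
--         elif key == 'included)':
--             iscontinue=True
--             continue
--         elif iscontinue == True:
--             iscontinue=False
--             continue
--
--         if i%2==1:
--             str += key+'원\n\t'
--         else :
--             str += key+'\t'
--         i += 1
--
--     return str
-- ===== SOURCE B (Python) =====
-- def make_menu_ilpum(data):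
--     SKIP = ('(pork', '(beef', '(pork,', 'beef', 'null')
--     # 1) drop the noise words outright
--     tokens = [t for t in data.split() if t not in SKIP]
--     # 2) delete each run of 'included)' markers together with the one token the run consumes
--     kept = []
--     i = 0
--     n = len(tokens)
--     while i < n:
--         if tokens[i] == 'included)':
--             while i < n and tokens[i] == 'included)':
--                 i += 1
--             i += 1  # the single token eaten by the marker run (if any)
--         else:
--             kept.append(tokens[i])
--             i += 1
--     # 3) render as name/price pairs
--     it = iter(kept)
--     parts = [a + '\t' + b + '원\n\t' for a, b in zip(it, it)]
--     if len(kept) % 2 == 1: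
--         parts.append(kept[-1] + '\t')
--     return '\t' + ''.join(parts)
-- ===== Notes on version B (the rewrite author's own statement) =====
-- stated objective: alternative
-- what changed: Replaces A's single loop with interleaved skip-flag, parity counter and string building by three staged transformations: filter out the noise words, then delete each run of 'included)' markers together with the single following token the flag consumes, then render the survivors as consecutive name/price pairs via zip over one iterator plus a lone-tail case.
import Mathlib
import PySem

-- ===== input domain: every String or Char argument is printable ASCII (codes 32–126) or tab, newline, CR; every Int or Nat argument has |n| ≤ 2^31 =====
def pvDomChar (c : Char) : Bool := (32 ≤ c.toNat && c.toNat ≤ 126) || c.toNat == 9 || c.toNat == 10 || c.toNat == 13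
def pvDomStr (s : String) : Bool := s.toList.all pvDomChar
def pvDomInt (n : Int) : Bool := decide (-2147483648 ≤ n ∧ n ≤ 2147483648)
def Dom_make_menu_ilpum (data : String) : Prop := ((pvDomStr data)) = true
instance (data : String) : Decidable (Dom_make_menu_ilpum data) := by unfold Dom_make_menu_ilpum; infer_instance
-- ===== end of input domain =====

-- B replaces A's single stateful loop (counter + skip flag + string building) by three staged
-- transformations: a filter, a run-deletion scan, and a pairwise renderer; same return value.

-- ===== PORT A =====
-- A: one loop over data.split() with state (i, iscontinue, str)
def pvStepA (st : Int × Bool × String) (key : String) : Int × Bool × String :=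
  match st with
  | (i, iscontinue, s) =>
    if key == "(pork" || key == "(beef" || key == "(pork," || key == "beef" || key == "null" then
      (i, iscontinue, s)
    else if key == "included)" then
      (i, true, s)
    else if iscontinue then
      (i, false, s)
    else if PySem.Int.mod i 2 == 1 then
      (i + 1, iscontinue, s ++ (key ++ "원\n\t"))
    else
      (i + 1, iscontinue, s ++ (key ++ "\t"))

def make_menu_ilpum (data : String) : String :=
  ((PySem.Str.split₀ data).foldl pvStepA (0, false, "\t")).2.2

-- ===== PORT B =====
-- Source B stage 2: the while loop over `tokens`; the outer iteration is pvBscan, the inner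
-- 'while … == "included)"' run is pvBafter, the trailing 'i += 1' is pvBafter's fall-through.
mutual
def pvBscan : List String → List String
  | [] => []
  | t :: ts => if t == "included)" then pvBafter ts else t :: pvBscan ts
def pvBafter : List String → List String
  | [] => []
  | t :: ts => if t == "included)" then pvBafter ts else pvBscan ts
end

def pvNoSkip (t : String) : Bool := !(["(pork", "(beef", "(pork,", "beef", "null"].contains t)

-- Source B stage 3: zip(it, it) over one iterator = consecutive pairs
def pvBpairs : List String → List (String × String)
  | a :: b :: ts => (a, b) :: pvBpairs ts
  | _ => []

def make_menu_ilpum_alt (data : String) : String :=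
  let tokens := (PySem.Str.split₀ data).filter pvNoSkip
  let kept := pvBscan tokens
  let parts := (pvBpairs kept).map (fun p => p.1 ++ "\t" ++ p.2 ++ "원\n\t")
  let parts := if kept.length % 2 == 1
    then parts ++ [((PySem.List.pyGet? kept (-1)).getD "") ++ "\t"]  -- kept[-1]; guarded nonempty, .getD unreachable
    else parts
  "\t" ++ PySem.Str.join "" parts

-- ===== PRECONDITION & SPEC =====
def Spec_make_menu_ilpum (data : String) (out : String) : Prop := out = make_menu_ilpum_alt data
instance (data : String) (out : String) : Decidable (Spec_make_menu_ilpum data out) := by unfold Spec_make_menu_ilpum; infer_instance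

-- ===== CLAIM (what is proved, stated in full; the proofs are below) =====
def Claim_equal_make_menu_ilpum : Prop := ∀ (data : String), Dom_make_menu_ilpum data → Spec_make_menu_ilpum data (make_menu_ilpum data)

-- ===== LEMMAS AND PROOFS =====

-- the tokens A keeps, as a pure recursive function (proof-only)
def pvKept : Bool → List String → List String
  | _, [] => []
  | flag, k :: ks =>
    if k == "(pork" || k == "(beef" || k == "(pork," || k == "beef" || k == "null" then
      pvKept flag ks
    else if k == "included)" then pvKept true ks
    else if flag then pvKept false ks
    else k :: pvKept flag ks

-- A's rendering of a token list starting at string s and counter n (proof-only)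
def pvRend (s : String) (n : Int) : List String → String
  | [] => s
  | k :: ks => pvRend (s ++ (k ++ (if PySem.Int.mod n 2 == 1 then "원\n\t" else "\t"))) (n + 1) ks

-- pairwise rendering, the common normal form (proof-only)
def pvPairStr : List String → String
  | [] => ""
  | [a] => a ++ "\t"
  | a :: b :: ts => a ++ "\t" ++ b ++ "원\n\t" ++ pvPairStr ts

theorem pvRendA (ws : List String) : ∀ (i : Int) (flag : Bool) (s : String),
    (ws.foldl pvStepA (i, flag, s)).2.2 = pvRend s i (pvKept flag ws) := by
  induction ws with
  | nil => intro i flag s; simp [pvKept, pvRend]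
  | cons k ks ih =>
    intro i flag s
    simp only [List.foldl_cons, pvStepA, pvKept]
    split_ifs with h1 h2 h3 h4
    · exact ih i flag s
    · exact ih i true s
    · exact ih i false s
    · rw [ih]; simp only [pvRend]; rw [if_pos (by simpa using h4)]
    · rw [ih]; simp only [pvRend]; rw [if_neg (by simpa using h4)]

theorem pvContains_eq (key : String) :
    (["(pork", "(beef", "(pork,", "beef", "null"].contains key)
      = (key == "(pork" || key == "(beef" || key == "(pork," || key == "beef" || key == "null") := by
  cases h1 : key == "(pork" <;> cases h2 : key == "(beef" <;> cases h3 : key == "(pork," <;>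
    cases h4 : key == "beef" <;> cases h5 : key == "null" <;>
    simp [List.contains, List.elem, h1, h2, h3, h4, h5]

-- filtering the skip-words first, then deleting the 'included)' runs, picks exactly A's tokens
theorem pvKept_eq_scan (ws : List String) :
    pvKept false ws = pvBscan (ws.filter pvNoSkip)
    ∧ pvKept true ws = pvBafter (ws.filter pvNoSkip) := by
  induction ws with
  | nil => simp [pvKept, pvBscan, pvBafter]
  | cons k ks ih =>
    have hk : pvNoSkip k = !(k == "(pork" || k == "(beef" || k == "(pork," || k == "beef" || k == "null") := by
      rw [pvNoSkip, pvContains_eq]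
    simp only [List.filter_cons, hk, pvKept]
    by_cases h1 : (k == "(pork" || k == "(beef" || k == "(pork," || k == "beef" || k == "null") = true
    · simp [h1, ih]
    · by_cases h2 : k = "included)"
      · simp [h2, pvBscan, pvBafter, ih]
      · have h2' : (k == "included)") = false := by simp [h2]
        simp [h1, h2', pvBscan, pvBafter, ih]

theorem pvMod_succ_of_even (n : Int) (h : PySem.Int.mod n 2 = 0) :
    PySem.Int.mod (n + 1) 2 = 1 := by
  rw [PySem.Int.mod_eq_emod_of_pos] at * <;> omega

theorem pvMod_succ_of_odd (n : Int) (h : PySem.Int.mod n 2 = 1) :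
    PySem.Int.mod (n + 1) 2 = 0 := by
  rw [PySem.Int.mod_eq_emod_of_pos] at * <;> omega

-- A's renderer at an even counter is the pairwise renderer
theorem pvRend_eq_pairStr (ks : List String) : ∀ (s : String) (n : Int),
    PySem.Int.mod n 2 = 0 → pvRend s n ks = s ++ pvPairStr ks := by
  induction ks using pvPairStr.induct with
  | case1 => intro s n _; simp [pvRend, pvPairStr]
  | case2 a =>
    intro s n h
    have hb : (PySem.Int.mod n 2 == 1) = false := by rw [h]; decide
    simp only [pvRend, hb, Bool.false_eq_true, if_false]
    simp [pvPairStr]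
  | case3 a b ts ih =>
    intro s n h
    have hb0 : (PySem.Int.mod n 2 == 1) = false := by rw [h]; decide
    have hb1 : (PySem.Int.mod (n + 1) 2 == 1) = true := by rw [pvMod_succ_of_even n h]; decide
    simp only [pvRend, hb0, hb1, if_false, if_true, Bool.false_eq_true]
    rw [ih _ (n + 1 + 1) (pvMod_succ_of_odd (n + 1) (pvMod_succ_of_even n h))]
    simp [pvPairStr, String.append_assoc]

theorem pvJoin_empty_nil : PySem.Str.join "" [] = "" := by decide

theorem pvJoin_empty_cons (x : String) (l : List String) :
    PySem.Str.join "" (x :: l) = x ++ PySem.Str.join "" l := by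
  cases l with
  | nil => simp [PySem.Str.join, PySem.Chars.join, List.intercalate]
  | cons y ys => simp [PySem.Str.join, PySem.Chars.join, List.intercalate]

-- B's pairwise construction also yields the pairwise renderer
def pvPartF : String × String → String := fun p => p.1 ++ "\t" ++ p.2 ++ "원\n\t"

theorem pvB_render_even (ks : List String) (h : ks.length % 2 = 0) :
    PySem.Str.join "" ((pvBpairs ks).map pvPartF) = pvPairStr ks := by
  induction ks using pvPairStr.induct with
  | case1 => simp [pvBpairs, pvPairStr, pvJoin_empty_nil]
  | case2 a => simp at h
  | case3 a b ts ih =>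
    have hts : ts.length % 2 = 0 := by simp [List.length_cons] at h; omega
    simp only [pvBpairs, List.map_cons, pvJoin_empty_cons, ih hts]
    simp [pvPartF, pvPairStr, String.append_assoc]

theorem pvB_render_odd (ks : List String) (h : ks.length % 2 = 1) :
    PySem.Str.join "" ((pvBpairs ks).map pvPartF ++ [((PySem.List.pyGet? ks (-1)).getD "") ++ "\t"])
      = pvPairStr ks := by
  induction ks using pvPairStr.induct with
  | case1 => simp at h
  | case2 a =>
    simp [pvBpairs, pvPairStr, PySem.List.pyGet?_neg_one, pvJoin_empty_cons, pvJoin_empty_nil]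
  | case3 a b ts ih =>
    have hts : ts.length % 2 = 1 := by simp [List.length_cons] at h; omega
    have hne : ts ≠ [] := by intro hn; rw [hn] at hts; simp at hts
    have hlast : PySem.List.pyGet? (a :: b :: ts) (-1) = PySem.List.pyGet? ts (-1) := by
      rw [PySem.List.pyGet?_neg_one, PySem.List.pyGet?_neg_one]
      cases ts with
      | nil => exact absurd rfl hne
      | cons c cs => rw [List.getLast?_cons_cons, List.getLast?_cons_cons]
    simp only [pvBpairs, List.map_cons, List.cons_append, pvJoin_empty_cons, hlast, ih hts]
    simp [pvPartF, pvPairStr, String.append_assoc]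

theorem pvB_render_eq (ks : List String) :
    PySem.Str.join ""
      (if ks.length % 2 == 1
        then ((pvBpairs ks).map (fun p => p.1 ++ "\t" ++ p.2 ++ "원\n\t"))
              ++ [((PySem.List.pyGet? ks (-1)).getD "") ++ "\t"]
        else (pvBpairs ks).map (fun p => p.1 ++ "\t" ++ p.2 ++ "원\n\t")) = pvPairStr ks := by
  have hf : (fun p : String × String => p.1 ++ "\t" ++ p.2 ++ "원\n\t") = pvPartF := rfl
  by_cases h : ks.length % 2 = 1
  · have hb : (ks.length % 2 == 1) = true := by rw [h]; decide
    rw [hb, if_pos rfl, hf, pvB_render_odd ks h]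
  · have h0 : ks.length % 2 = 0 := by omega
    have hb : (ks.length % 2 == 1) = false := by rw [h0]; decide
    rw [hb, if_neg (by simp), hf, pvB_render_even ks h0]

-- ===== VERDICT (by name: the statement is the Claim_ definition above) =====
theorem make_menu_ilpum_spec : Claim_equal_make_menu_ilpum := by
  intro data _
  unfold Spec_make_menu_ilpum make_menu_ilpum make_menu_ilpum_alt
  rw [pvRendA, pvRend_eq_pairStr _ _ 0 (by decide), (pvKept_eq_scan _).1]
  exact (congrArg (fun x => "\t" ++ x) (pvB_render_eq _)).symm
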